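-- pv_equiv track=rewrite | github.com/pisterlabs/promptset | data/scraping-2.0/repos/abponcio~QuizAI/quiz.py | create_answers_view
-- ===== SOURCE A (Python) =====
-- def create_answers_view(quiz, num_questions):
--   answer_view = {1: ''}
--   question_number = 1
--
--   for line in quiz.split('\n'):
--     if line.startswith('Correct answer:'):
--         answer_view[question_number] += line + '\n'
--         if question_number < num_questions:
--             question_number += 1
--             answer_view[question_number] = ''
--
--   return answer_view
-- ===== SOURCE B (Python) =====
-- def create_answers_view(quiz, num_questions):
--     lines = [l + '\n' for l in quiz.split('\n') if l.startswith('Correct answer:')]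
--     top = max(1, min(len(lines) + 1, num_questions))
--     view = {q: lines[q - 1] for q in range(1, top)}
--     view[top] = ''.join(lines[top - 1:])
--     return view
-- ===== Notes on version B (the rewrite author's own statement) =====
-- stated objective: simpler
-- what changed: B first filters the 'Correct answer:' lines, computes the top bucket index in closed form, then builds the dict directly (one line per bucket, the joined remainder in the last bucket) instead of interleaving accumulation and question-advancing in a single stateful loop.
import Mathlib
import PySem

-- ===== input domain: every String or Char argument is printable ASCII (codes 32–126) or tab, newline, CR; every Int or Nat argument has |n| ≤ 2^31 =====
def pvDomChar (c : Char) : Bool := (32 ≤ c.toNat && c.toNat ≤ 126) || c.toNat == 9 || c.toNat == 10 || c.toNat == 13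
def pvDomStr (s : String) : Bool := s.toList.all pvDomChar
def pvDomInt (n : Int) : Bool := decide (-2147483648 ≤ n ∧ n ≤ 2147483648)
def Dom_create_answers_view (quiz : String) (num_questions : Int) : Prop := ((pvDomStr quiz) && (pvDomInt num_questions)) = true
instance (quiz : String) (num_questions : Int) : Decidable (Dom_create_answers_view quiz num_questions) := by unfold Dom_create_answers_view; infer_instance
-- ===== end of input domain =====

-- B filters the 'Correct answer:' lines first, computes the top bucket index in closed form and
-- builds the dict directly (one line per bucket, joined remainder in the last bucket), instead of
-- A's single stateful loop interleaving accumulation with question advancing. Objective: simpler.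

-- ===== PORT A =====
def create_answers_view (quiz : String) (num_questions : Int) : List (Int × String) :=
  let answer_view : PySem.Dict Int String := PySem.Dict.empty.insert 1 ""
  let st := ((PySem.Str.split? quiz "\n").getD []).foldl
    (fun (st : PySem.Dict Int String × Int) line =>
      if PySem.Str.startswith line "Correct answer:" then
        let d := st.1.modify st.2 "" (fun s => s ++ line ++ "\n")
        if st.2 < num_questions then (d.insert (st.2 + 1) "", st.2 + 1) else (d, st.2)
      else st)
    (answer_view, 1)
  st.1.items

-- ===== PORT B =====
def create_answers_view_alt (quiz : String) (num_questions : Int) : List (Int × String) :=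
  let lines := (((PySem.Str.split? quiz "\n").getD []).filter
      (fun l => PySem.Str.startswith l "Correct answer:")).map (fun l => l ++ "\n")
  let top : Int := max 1 (min (PySem.List.len lines + 1) num_questions)
  let view : PySem.Dict Int String := (PySem.List.pyRange 1 top 1).foldl
    (fun d q => d.insert q (PySem.List.pyGetD lines (q - 1) "")) PySem.Dict.empty
  let view := view.insert top (PySem.Str.join "" (PySem.List.slice lines (some (top - 1)) none))
  view.items

-- ===== PRECONDITION & SPEC =====
def Spec_create_answers_view (quiz : String) (num_questions : Int) (out : List (Int × String)) : Prop := out = create_answers_view_alt quiz num_questions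
instance (quiz : String) (num_questions : Int) (out : List (Int × String)) : Decidable (Spec_create_answers_view quiz num_questions out) := by unfold Spec_create_answers_view; infer_instance

-- ===== CLAIM (what is proved, stated in full; the proofs are below) =====
def Claim_equal_create_answers_view : Prop := ∀ (quiz : String) (num_questions : Int), Dom_create_answers_view quiz num_questions → Spec_create_answers_view quiz num_questions (create_answers_view quiz num_questions)

-- ===== LEMMAS AND PROOFS =====

-- A's loop body restricted to lines that pass the startswith test
def cavStep (nq : Int) (st : PySem.Dict Int String × Int) (line : String) :
    PySem.Dict Int String × Int :=
  let d := st.1.modify st.2 "" (fun s => s ++ line ++ "\n")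
  if st.2 < nq then (d.insert (st.2 + 1) "", st.2 + 1) else (d, st.2)

-- the association list A's loop produces from the remaining correct lines,
-- current question q and currently accumulated string s
def cavSpread (nq : Int) : List String → Int → String → List (Int × String)
  | [], q, s => [(q, s)]
  | l :: ls, q, s =>
    if q < nq then (q, s ++ l ++ "\n") :: cavSpread nq ls (q + 1) ""
    else cavSpread nq ls q (s ++ l ++ "\n")

lemma cav_get?_mk_last (D : List (Int × String)) (q : Int) (s : String)
    (h : ∀ p ∈ D, p.1 ≠ q) :
    (PySem.Dict.mk (D ++ [(q, s)])).get? q = some s := by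
  induction D with
  | nil => simp [PySem.Dict.get?]
  | cons p D ih =>
    obtain ⟨a, b⟩ := p
    have h1 : a ≠ q := h (a, b) (by simp)
    simp only [List.cons_append, PySem.Dict.get?_mk_cons]
    rw [if_neg (by simpa using h1)]
    exact ih (fun p hp => h p (by simp [hp]))

lemma cav_insert_mk_last (D : List (Int × String)) (q : Int) (s v : String)
    (h : ∀ p ∈ D, p.1 ≠ q) :
    (PySem.Dict.mk (D ++ [(q, s)])).insert q v = PySem.Dict.mk (D ++ [(q, v)]) := by
  have hc : (PySem.Dict.mk (D ++ [(q, s)])).contains q = true := by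
    simp [PySem.Dict.contains]
  simp only [PySem.Dict.insert, hc, if_true]
  congr 1
  simp only [List.map_append]
  congr 1
  · have : ∀ p ∈ D, (if (p.1 == q) = true then ((q, v) : Int × String) else p) = p := by
      intro p hp; simp [h p hp]
    rw [List.map_congr_left this]; simp
  · simp

lemma cav_insert_mk_fresh (D : List (Int × String)) (k : Int) (v : String)
    (h : ∀ p ∈ D, p.1 ≠ k) :
    (PySem.Dict.mk D).insert k v = PySem.Dict.mk (D ++ [(k, v)]) := by
  have hc : (PySem.Dict.mk D).contains k = false := by
    simp only [PySem.Dict.contains, List.any_eq_false]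
    intro p hp; simpa using h p hp
  simp [PySem.Dict.insert, hc]

lemma cav_loop_spread (nq : Int) (ls : List String) (D : List (Int × String)) (q : Int) (s : String)
    (h : ∀ p ∈ D, p.1 < q) :
    (ls.foldl (cavStep nq) (PySem.Dict.mk (D ++ [(q, s)]), q)).1.items
      = D ++ cavSpread nq ls q s := by
  induction ls generalizing D q s with
  | nil => simp [cavSpread]
  | cons l ls ih =>
    have hne : ∀ p ∈ D, p.1 ≠ q := fun p hp => ne_of_lt (h p hp)
    have hmod : (PySem.Dict.mk (D ++ [(q, s)])).modify q "" (fun t => t ++ l ++ "\n")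
        = PySem.Dict.mk (D ++ [(q, s ++ l ++ "\n")]) := by
      rw [PySem.Dict.modify, PySem.Dict.getD, cav_get?_mk_last D q s hne]
      exact cav_insert_mk_last D q s _ hne
    simp only [List.foldl_cons, cavStep, hmod]
    by_cases hq : q < nq
    · have hfresh : ∀ p ∈ (D ++ [(q, s ++ l ++ "\n")]), p.1 ≠ q + 1 := by
        intro p hp
        rcases List.mem_append.1 hp with hp | hp
        · exact ne_of_lt (by linarith [h p hp])
        · simp at hp; rw [hp]; omega
      have hlt : ∀ p ∈ (D ++ [(q, s ++ l ++ "\n")]), p.1 < q + 1 := by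
        intro p hp
        rcases List.mem_append.1 hp with hp | hp
        · linarith [h p hp]
        · simp at hp; rw [hp]; omega
      rw [if_pos hq, cav_insert_mk_fresh _ _ _ hfresh]
      rw [ih (D ++ [(q, s ++ l ++ "\n")]) (q + 1) "" hlt, List.append_assoc]
      simp [cavSpread, hq]
    · rw [if_neg hq, ih D q (s ++ l ++ "\n") h]
      simp [cavSpread, hq]

lemma cav_join_cons (x : String) (xs : List String) :
    PySem.Str.join "" (x :: xs) = x ++ PySem.Str.join "" xs := by
  simp only [PySem.Str.join, List.map_cons]
  rw [show PySem.Chars.join "".toList (x.toList :: List.map String.toList xs)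
      = x.toList ++ PySem.Chars.join "".toList (List.map String.toList xs) by
    cases xs <;> simp [PySem.Chars.join, List.intercalate]]
  rw [String.ofList_append, String.ofList_toList]

lemma cav_pyGetD_cons {α : Type} (x : α) (xs : List α) (i : Int) (hi : 0 ≤ i) (d : α) :
    PySem.List.pyGetD (x :: xs) (i + 1) d = PySem.List.pyGetD xs i d := by
  obtain ⟨n, rfl⟩ := Int.eq_ofNat_of_zero_le hi
  rw [show ((n : Int) + 1) = ((n + 1 : Nat) : Int) by push_cast; ring,
    PySem.List.pyGetD_natCast, PySem.List.pyGetD_natCast, List.getD_cons_succ]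

lemma cav_spread_ge (nq : Int) (ls : List String) (q : Int) (s : String) (h : ¬ q < nq) :
    cavSpread nq ls q s = [(q, s ++ PySem.Str.join "" (ls.map (fun l => l ++ "\n")))] := by
  induction ls generalizing s with
  | nil => simp [cavSpread, PySem.Str.join]
  | cons l ls ih =>
    simp only [cavSpread, if_neg h, ih, List.map_cons, cav_join_cons]
    simp [String.append_assoc]

lemma cav_spread_closed (nq : Int) (ls : List String) (q : Int) (h : q < nq) :
    cavSpread nq ls q ""
      = ((PySem.List.pyRange q (min ((ls.length : Int) + q) nq) 1).map
            (fun j => (j, PySem.List.pyGetD ls (j - q) "" ++ "\n")))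
        ++ [(min ((ls.length : Int) + q) nq,
             PySem.Str.join "" ((ls.drop ((min ((ls.length : Int) + q) nq) - q).toNat).map
               (fun l => l ++ "\n")))] := by
  induction ls generalizing q with
  | nil =>
    have : min ((([] : List String).length : Int) + q) nq = q := by simp; omega
    rw [this]
    simp [cavSpread, PySem.Str.join, PySem.List.pyRange]
  | cons l ls ih =>
    by_cases h1 : q + 1 < nq
    · have hT : min (((l :: ls).length : Int) + q) nq = min ((ls.length : Int) + (q + 1)) nq := by
        simp only [List.length_cons]; push_cast; omega
      have hqt : q < min ((ls.length : Int) + (q + 1)) nq := by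
        have : (0:Int) ≤ (ls.length : Int) := by positivity
        omega
      rw [show cavSpread nq (l :: ls) q "" = (q, "" ++ l ++ "\n") :: cavSpread nq ls (q+1) "" by
        simp [cavSpread, h]]
      rw [ih (q+1) h1, hT]
      rw [PySem.List.pyRange_one_cons hqt]
      simp only [List.map_cons, List.cons_append]
      congr 1
      · simp [sub_self, PySem.List.pyGetD_zero_cons]
      congr 1
      · apply List.map_congr_left
        intro j hj
        have hj' := (PySem.List.mem_pyRange_one.mp hj)
        rw [show j - q = (j - (q+1)) + 1 by ring, cav_pyGetD_cons _ _ _ (by omega)]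
      · congr 3
        rw [show (min ((ls.length : Int) + (q + 1)) nq - q).toNat
            = (min ((ls.length : Int) + (q + 1)) nq - (q+1)).toNat + 1 by omega]
        rw [List.drop_succ_cons]
    · have hnq : nq = q + 1 := by omega
      have htop : min (((l :: ls).length : Int) + q) nq = q + 1 := by
        simp only [List.length_cons]; push_cast; omega
      rw [show cavSpread nq (l :: ls) q "" = (q, "" ++ l ++ "\n") :: cavSpread nq ls (q+1) "" by
        simp [cavSpread, h]]
      rw [cav_spread_ge nq ls (q+1) "" h1, htop]
      rw [PySem.List.pyRange_one_cons (by omega), show PySem.List.pyRange (q+1) (q+1) = [] by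
        simp [PySem.List.pyRange]]
      simp

lemma cav_main (quiz : String) (nq : Int) :
    create_answers_view quiz nq = create_answers_view_alt quiz nq := by
  unfold create_answers_view create_answers_view_alt
  set all := (PySem.Str.split? quiz "\n").getD [] with hall
  set p := fun l => PySem.Str.startswith l "Correct answer:" with hp
  have hA : (all.foldl
      (fun (st : PySem.Dict Int String × Int) line =>
        if PySem.Str.startswith line "Correct answer:" then
          let d := st.1.modify st.2 "" (fun s => s ++ line ++ "\n")
          if st.2 < nq then (d.insert (st.2 + 1) "", st.2 + 1) else (d, st.2)
        else st)
      (PySem.Dict.empty.insert 1 "", 1)).1.items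
      = cavSpread nq (all.filter p) 1 "" := by
    have h1 : (all.foldl
        (fun (st : PySem.Dict Int String × Int) line =>
          if p line then cavStep nq st line else st)
        (PySem.Dict.mk ([] ++ [(1, "")]), 1)).1.items
        = cavSpread nq (all.filter p) 1 "" := by
      rw [← List.foldl_filter]
      exact cav_loop_spread nq (all.filter p) [] 1 "" (by simp)
    exact h1
  rw [hA]
  set fls := all.filter p with hfls
  set lines := fls.map (fun l => l ++ "\n") with hlines
  set top := max 1 (min (PySem.List.len lines + 1) nq) with htop
  have hfold : ((PySem.List.pyRange 1 top 1).foldl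
      (fun (d : PySem.Dict Int String) q => d.insert q (PySem.List.pyGetD lines (q - 1) ""))
      PySem.Dict.empty).items
      = (PySem.List.pyRange 1 top 1).map (fun q => (q, PySem.List.pyGetD lines (q - 1) "")) := by
    have := PySem.Dict.items_foldl_insert_fresh (l := PySem.List.pyRange 1 top 1)
      (k := fun a => a) (v := fun q => PySem.List.pyGetD lines (q - 1) "")
      (d := PySem.Dict.empty) (fun a _ => PySem.Dict.contains_empty _)
      (by simpa using PySem.List.nodup_pyRange_one 1 top)
    simpa using this
  have hview : ((PySem.List.pyRange 1 top 1).foldl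
      (fun (d : PySem.Dict Int String) q => d.insert q (PySem.List.pyGetD lines (q - 1) ""))
      PySem.Dict.empty)
      = PySem.Dict.mk ((PySem.List.pyRange 1 top 1).map
          (fun q => (q, PySem.List.pyGetD lines (q - 1) ""))) := by
    apply PySem.Dict.ext; exact hfold
  show cavSpread nq fls 1 "" =
    (((PySem.List.pyRange 1 top 1).foldl
        (fun (d : PySem.Dict Int String) q => d.insert q (PySem.List.pyGetD lines (q - 1) ""))
        PySem.Dict.empty).insert top
      (PySem.Str.join "" (PySem.List.slice lines (some (top - 1)) none))).items
  rw [hview, cav_insert_mk_fresh _ _ _ (by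
    intro pq hpq
    simp only [List.mem_map] at hpq
    obtain ⟨q, hq, rfl⟩ := hpq
    have := PySem.List.mem_pyRange_one.mp hq
    omega)]
  have hlen : (lines.length : Int) = (fls.length : Int) := by
    rw [hlines]; simp
  by_cases hq1 : 1 < nq
  · have htop' : top = min ((fls.length : Int) + 1) nq := by
      rw [htop, PySem.List.len_eq, hlen]
      have : (0:Int) ≤ (fls.length : Int) := by positivity
      omega
    rw [cav_spread_closed nq fls 1 hq1]
    congr 1
    · rw [htop']
      apply List.map_congr_left
      intro j hj
      have hj' := PySem.List.mem_pyRange_one.mp hj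
      have hj1 : (0:Int) ≤ j - 1 := by omega
      have hj2 : j - 1 < ((fls.length : Int)) := by omega
      have hj3' : j - 1 < (((fls.map (fun l => l ++ "\n")).length : Int)) := by
        simp only [List.length_map]; omega
      simp only [PySem.List.pyGetD_eq_getElem fls "" hj1 hj2, hlines,
        PySem.List.pyGetD_eq_getElem (fls.map (fun l => l ++ "\n")) "" hj1 hj3',
        List.getElem_map]
    · rw [htop']
      congr 2
      rw [PySem.List.slice_from _ (by omega), hlines, List.map_drop]
  · have htop1 : top = 1 := by
      rw [htop, PySem.List.len_eq]
      have : (0:Int) ≤ (lines.length : Int) := by positivity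
      omega
    rw [cav_spread_ge nq fls 1 "" hq1, htop1]
    rw [show PySem.List.pyRange 1 1 1 = [] by simp [PySem.List.pyRange]]
    rw [PySem.List.slice_from _ (by omega)]
    simp [hlines]

-- ===== VERDICT (by name: the statement is the Claim_ definition above) =====
theorem create_answers_view_spec : Claim_equal_create_answers_view := by
  intro quiz nq _
  unfold Spec_create_answers_view
  exact cav_main quiz nq
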